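-- pv_equiv track=rewrite | github.com/dmalt/yandex_trenirovki | s2/division_b/hw7/d_kittens_fill/d_kittens_fill.py | countkittens
-- ===== SOURCE A (Python) =====
-- START = -1
--
-- END = 1
--
-- KITTEN = 0
--
-- def countkittens(intervals, kittens):
--     events = []
--     for i, (l, r) in enumerate(intervals):
--         events.append((l, START, i))
--         events.append((r, END, i))
--     for i, k in enumerate(kittens):
--         events.append((k, KITTEN, i))
--     events.sort()
--
--     kittenscntend = [0] * len(intervals)
--     kittenscntstart = [0] * len(intervals)
--     kittenscnt = 0
--
--     for ev in events:
--         if ev[1] == START: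
--             kittenscntstart[ev[2]] = kittenscnt
--         elif ev[1] == END:
--             kittenscntend[ev[2]] = kittenscnt
--         elif ev[1] == KITTEN:
--             kittenscnt += 1
--     return [e - s for e, s in zip(kittenscntend, kittenscntstart)]
-- ===== SOURCE B (Python) =====
-- def _bisect_left(a, x):
--     lo, hi = 0, len(a)
--     while lo < hi:
--         mid = (lo + hi) // 2
--         if a[mid] < x:
--             lo = mid + 1
--         else:
--             hi = mid
--     return lo
--
--
-- def _bisect_right(a, x):
--     lo, hi = 0, len(a)
--     while lo < hi:
--         mid = (lo + hi) // 2
--         if x < a[mid]: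
--             hi = mid
--         else:
--             lo = mid + 1
--     return lo
--
--
-- def countkittens(intervals, kittens):
--     ks = sorted(kittens)
--     return [_bisect_right(ks, r) - _bisect_left(ks, l) for l, r in intervals]
-- ===== Notes on version B (the rewrite author's own statement) =====
-- stated objective: faster
-- what changed: Replaces the event-list sweep (build and sort 2n+m tagged events, then fold counters through them) with sorting the kittens once and answering each interval by two binary searches (bisect_right(r) - bisect_left(l)).
import Mathlib
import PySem

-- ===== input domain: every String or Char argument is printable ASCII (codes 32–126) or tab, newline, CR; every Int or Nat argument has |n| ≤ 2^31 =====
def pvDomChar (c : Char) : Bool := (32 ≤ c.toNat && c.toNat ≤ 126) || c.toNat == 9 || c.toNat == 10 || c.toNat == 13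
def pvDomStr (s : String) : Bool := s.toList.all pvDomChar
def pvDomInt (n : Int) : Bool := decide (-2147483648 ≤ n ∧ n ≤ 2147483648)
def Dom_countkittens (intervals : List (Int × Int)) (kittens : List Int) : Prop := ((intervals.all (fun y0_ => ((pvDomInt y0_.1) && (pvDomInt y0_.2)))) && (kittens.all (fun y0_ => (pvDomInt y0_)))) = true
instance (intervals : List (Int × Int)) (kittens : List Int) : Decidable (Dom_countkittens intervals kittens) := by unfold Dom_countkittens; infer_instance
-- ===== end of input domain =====

-- B replaces A's build-and-sort event sweep by sorting the kittens once and answering each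
-- interval with two binary searches; equivalence is proved on all inputs (both are total).

-- ===== PORT A =====
-- Python tuple comparison on the (value, tag, index) event triples is lexicographic:
-- the sort key maps each triple into the lexicographic order on Int × Int × Int.
def pvEvKey (e : Int × Int × Int) : Lex (Int × Lex (Int × Int)) := toLex (e.1, toLex (e.2.1, e.2.2))

-- one fold step of A's event loop; state = (kittenscntend, kittenscntstart, kittenscnt).
-- The written index ev.2.2 comes from enumerate, hence is ≥ 0 and < the array length, so
-- .toNat is exact here (Python's arr[i] = v with 0 ≤ i < len(arr)).
def pvStep (st : List Int × List Int × Int) (ev : Int × Int × Int) : List Int × List Int × Int :=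
  if ev.2.1 = -1 then (st.1, st.2.1.set ev.2.2.toNat st.2.2, st.2.2)
  else if ev.2.1 = 1 then (st.1.set ev.2.2.toNat st.2.2, st.2.1, st.2.2)
  else (st.1, st.2.1, st.2.2 + 1)

def countkittens (intervals : List (Int × Int)) (kittens : List Int) : List Int :=
  let events0 : List (Int × Int × Int) :=
    (PySem.List.enumerate intervals).foldl
      (fun acc p => (acc ++ [(p.2.1, -1, p.1)]) ++ [(p.2.2, 1, p.1)]) []
  let events1 : List (Int × Int × Int) :=
    (PySem.List.enumerate kittens).foldl (fun acc p => acc ++ [(p.2, 0, p.1)]) events0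
  let events := PySem.List.sorted events1 pvEvKey false
  let st := events.foldl pvStep
    (List.replicate intervals.length 0, List.replicate intervals.length 0, 0)
  (st.1.zip st.2.1).map (fun p => p.1 - p.2)

-- ===== PORT B =====
-- Source B's _bisect_left/_bisect_right are verbatim CPython bisect loops; PySem.List.bisectLeft /
-- bisectRight are that same lo/hi halving loop, so they are the faithful port.
def countkittens_alt (intervals : List (Int × Int)) (kittens : List Int) : List Int :=
  let ks := PySem.List.sorted kittens (fun x => x) false
  intervals.map (fun p =>
    (PySem.List.bisectRight ks p.2 : Int) - (PySem.List.bisectLeft ks p.1 : Int))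

-- ===== PRECONDITION & SPEC =====
def Spec_countkittens (intervals : List (Int × Int)) (kittens : List Int) (out : List Int) : Prop := out = countkittens_alt intervals kittens
instance (intervals : List (Int × Int)) (kittens : List Int) (out : List Int) : Decidable (Spec_countkittens intervals kittens out) := by unfold Spec_countkittens; infer_instance

-- ===== CLAIM (what is proved, stated in full; the proofs are below) =====
def Claim_equal_countkittens : Prop := ∀ (intervals : List (Int × Int)) (kittens : List Int), Dom_countkittens intervals kittens → Spec_countkittens intervals kittens (countkittens intervals kittens)

-- ===== LEMMAS AND PROOFS =====

-- the two event predicates of the counting argument: "START/END event of interval i" and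
-- "kitten event sorted strictly before the event w"
def pvSPred (t : Int) (iz : Int) (e : Int × Int × Int) : Bool := e.2.1 == t && e.2.2 == iz
def pvKBefore (w : Int × Int × Int) (e : Int × Int × Int) : Bool :=
  e.2.1 == 0 && decide (pvEvKey e < pvEvKey w)

theorem pvEvKey_inj {a b : Int × Int × Int} (h : pvEvKey a = pvEvKey b) : a = b := by
  rcases a with ⟨a1, a2, a3⟩; rcases b with ⟨b1, b2, b3⟩
  simpa [pvEvKey, Prod.ext_iff] using h

theorem pv_kitten_lt_start (k j l i : Int) :
    pvEvKey (k, 0, j) < pvEvKey (l, -1, i) ↔ k < l := by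
  simp [pvEvKey, Prod.Lex.lt_iff]

theorem pv_kitten_lt_end (k j r i : Int) :
    pvEvKey (k, 0, j) < pvEvKey (r, 1, i) ↔ k ≤ r := by
  simp [pvEvKey, Prod.Lex.lt_iff]
  omega

theorem pvStep_len (s : List Int × List Int × Int) (e : Int × Int × Int) :
    (pvStep s e).1.length = s.1.length ∧ (pvStep s e).2.1.length = s.2.1.length := by
  unfold pvStep; split_ifs <;> simp

theorem pv_fold_len (L : List (Int × Int × Int)) (s : List Int × List Int × Int) :
    (L.foldl pvStep s).1.length = s.1.length ∧ (L.foldl pvStep s).2.1.length = s.2.1.length := by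
  induction L generalizing s with
  | nil => exact ⟨rfl, rfl⟩
  | cons h t ih =>
    rw [List.foldl_cons]
    rcases ih (pvStep s h) with ⟨h1, h2⟩
    rcases pvStep_len s h with ⟨g1, g2⟩
    exact ⟨h1.trans g1, h2.trans g2⟩

theorem pv_untouched_start (L : List (Int × Int × Int)) (s : List Int × List Int × Int) (i : Nat)
    (hnn : ∀ e ∈ L, 0 ≤ e.2.2) (hno : ∀ e ∈ L, ¬(e.2.1 = -1 ∧ e.2.2 = (i : Int))) :
    (L.foldl pvStep s).2.1[i]? = s.2.1[i]? := by
  induction L generalizing s with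
  | nil => rfl
  | cons h t ih =>
    rw [List.foldl_cons]
    rw [ih (pvStep s h) (fun e he => hnn e (List.mem_cons_of_mem _ he))
          (fun e he => hno e (List.mem_cons_of_mem _ he))]
    unfold pvStep
    split_ifs with h1 h2
    · have hne : h.2.2.toNat ≠ i := by
        have := hnn h (List.mem_cons_self ..)
        have := hno h (List.mem_cons_self ..)
        omega
      simp [List.getElem?_set_ne hne]
    · rfl
    · rfl

theorem pv_untouched_end (L : List (Int × Int × Int)) (s : List Int × List Int × Int) (i : Nat)
    (hnn : ∀ e ∈ L, 0 ≤ e.2.2) (hno : ∀ e ∈ L, ¬(e.2.1 = 1 ∧ e.2.2 = (i : Int))) :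
    (L.foldl pvStep s).1[i]? = s.1[i]? := by
  induction L generalizing s with
  | nil => rfl
  | cons h t ih =>
    rw [List.foldl_cons]
    rw [ih (pvStep s h) (fun e he => hnn e (List.mem_cons_of_mem _ he))
          (fun e he => hno e (List.mem_cons_of_mem _ he))]
    unfold pvStep
    split_ifs with h1 h2
    · rfl
    · have hne : h.2.2.toNat ≠ i := by
        have := hnn h (List.mem_cons_self ..)
        have := hno h (List.mem_cons_self ..)
        omega
      simp [List.getElem?_set_ne hne]
    · rfl

theorem pv_main_start (L : List (Int × Int × Int)) (s : List Int × List Int × Int)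
    (l : Int) (i : Nat)
    (hp : L.Pairwise (fun a b => pvEvKey a ≤ pvEvKey b))
    (hnn : ∀ e ∈ L, 0 ≤ e.2.2)
    (htag : ∀ e ∈ L, e.2.1 = -1 ∨ e.2.1 = 0 ∨ e.2.1 = 1)
    (hm : (l, -1, (i : Int)) ∈ L)
    (hc : L.countP (pvSPred (-1) (i : Int)) = 1)
    (hlen : i < s.2.1.length) :
    (L.foldl pvStep s).2.1[i]? =
      some (s.2.2 + (L.countP (pvKBefore (l, -1, (i : Int))) : Int)) := by
  induction L generalizing s with
  | nil => exact absurd hm (List.not_mem_nil)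
  | cons h t ih =>
    rw [List.foldl_cons]
    rw [List.pairwise_cons] at hp
    by_cases hh : pvSPred (-1) (i : Int) h = true
    · -- h is the unique START-i event, so h = (l, -1, i)
      have hct : t.countP (pvSPred (-1) (i : Int)) = 0 := by
        rw [List.countP_cons_of_pos hh] at hc; omega
      have he : h = (l, -1, (i : Int)) := by
        rcases List.mem_cons.mp hm with h1 | h2
        · exact h1.symm
        · exact absurd (List.countP_eq_zero.mp hct _ h2) (by simp [pvSPred])
      subst he
      have hstep : pvStep s (l, -1, (i : Int)) = (s.1, s.2.1.set i s.2.2, s.2.2) := by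
        simp [pvStep]
      rw [hstep]
      have hres := pv_untouched_start t (s.1, s.2.1.set i s.2.2, s.2.2) i
        (fun e he => hnn e (List.mem_cons_of_mem _ he))
        (fun e he hcon => by
          have := List.countP_eq_zero.mp hct _ he
          simp [pvSPred] at this
          exact absurd hcon.2 (this hcon.1))
      rw [hres]
      have hget : (s.2.1.set i s.2.2)[i]? = some s.2.2 := by
        exact List.getElem?_set_self hlen
      rw [hget]
      have hk0 : (List.countP (pvKBefore (l, -1, (i : Int))) ((l, -1, (i : Int)) :: t)) = 0 := by
        rw [List.countP_cons_of_neg, List.countP_eq_zero]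
        · intro e he hke
          simp [pvKBefore] at hke
          exact absurd hke.2 (not_lt.mpr (hp.1 e he))
        · simp [pvKBefore]
      rw [hk0]
      simp
    · -- h is not the START-i event; the target event is in t
      have hm' : (l, -1, (i : Int)) ∈ t := by
        rcases List.mem_cons.mp hm with h1 | h2
        · exact absurd hh (by simp [pvSPred, ← h1])
        · exact h2
      have hc' : t.countP (pvSPred (-1) (i : Int)) = 1 := by
        rwa [List.countP_cons_of_neg (by simpa using hh)] at hc
      have hnn' := fun e he => hnn e (List.mem_cons_of_mem _ he)
      have htag' := fun e he => htag e (List.mem_cons_of_mem _ he)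
      rcases htag h (List.mem_cons_self ..) with ht | ht | ht
      · -- START of another interval
        have hidx : h.2.2 ≠ (i : Int) := by
          intro hcon; exact hh (by simp [pvSPred, ht, hcon])
        have hstep : pvStep s h = (s.1, s.2.1.set h.2.2.toNat s.2.2, s.2.2) := by
          simp [pvStep, ht]
        rw [hstep]
        rw [ih (s.1, s.2.1.set h.2.2.toNat s.2.2, s.2.2) hp.2 hnn' htag' hm' hc'
            (by simpa using hlen)]
        rw [List.countP_cons_of_neg (by simp [pvKBefore, ht])]
      · -- a kitten event: it is strictly before the START-i event
        have hlt : pvEvKey h < pvEvKey (l, -1, (i : Int)) := by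
          rcases lt_or_eq_of_le (hp.1 _ hm') with h1 | h1
          · exact h1
          · exact absurd (congrArg (fun e => e.2.1) (pvEvKey_inj h1)) (by simp [ht])
        have hstep : pvStep s h = (s.1, s.2.1, s.2.2 + 1) := by
          simp [pvStep, ht]
        rw [hstep]
        rw [ih (s.1, s.2.1, s.2.2 + 1) hp.2 hnn' htag' hm' hc' hlen]
        rw [List.countP_cons_of_pos (by simp [pvKBefore, ht, hlt])]
        congr 1
        push_cast
        ring
      · -- END of some interval
        have hstep : pvStep s h = (s.1.set h.2.2.toNat s.2.2, s.2.1, s.2.2) := by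
          simp [pvStep, ht]
        rw [hstep]
        rw [ih (s.1.set h.2.2.toNat s.2.2, s.2.1, s.2.2) hp.2 hnn' htag' hm' hc' hlen]
        rw [List.countP_cons_of_neg (by simp [pvKBefore, ht])]

theorem pv_main_end (L : List (Int × Int × Int)) (s : List Int × List Int × Int)
    (r : Int) (i : Nat)
    (hp : L.Pairwise (fun a b => pvEvKey a ≤ pvEvKey b))
    (hnn : ∀ e ∈ L, 0 ≤ e.2.2)
    (htag : ∀ e ∈ L, e.2.1 = -1 ∨ e.2.1 = 0 ∨ e.2.1 = 1)
    (hm : (r, 1, (i : Int)) ∈ L)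
    (hc : L.countP (pvSPred 1 (i : Int)) = 1)
    (hlen : i < s.1.length) :
    (L.foldl pvStep s).1[i]? =
      some (s.2.2 + (L.countP (pvKBefore (r, 1, (i : Int))) : Int)) := by
  induction L generalizing s with
  | nil => exact absurd hm (List.not_mem_nil)
  | cons h t ih =>
    rw [List.foldl_cons]
    rw [List.pairwise_cons] at hp
    by_cases hh : pvSPred 1 (i : Int) h = true
    · have hct : t.countP (pvSPred 1 (i : Int)) = 0 := by
        rw [List.countP_cons_of_pos hh] at hc; omega
      have he : h = (r, 1, (i : Int)) := by
        rcases List.mem_cons.mp hm with h1 | h2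
        · exact h1.symm
        · exact absurd (List.countP_eq_zero.mp hct _ h2) (by simp [pvSPred])
      subst he
      have hstep : pvStep s (r, 1, (i : Int)) = (s.1.set i s.2.2, s.2.1, s.2.2) := by
        simp [pvStep]
      rw [hstep]
      have hres := pv_untouched_end t (s.1.set i s.2.2, s.2.1, s.2.2) i
        (fun e he => hnn e (List.mem_cons_of_mem _ he))
        (fun e he hcon => by
          have := List.countP_eq_zero.mp hct _ he
          simp [pvSPred] at this
          exact absurd hcon.2 (this hcon.1))
      rw [hres]
      have hget : (s.1.set i s.2.2)[i]? = some s.2.2 := List.getElem?_set_self hlen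
      rw [hget]
      have hk0 : (List.countP (pvKBefore (r, 1, (i : Int))) ((r, 1, (i : Int)) :: t)) = 0 := by
        rw [List.countP_cons_of_neg, List.countP_eq_zero]
        · intro e he hke
          simp [pvKBefore] at hke
          exact absurd hke.2 (not_lt.mpr (hp.1 e he))
        · simp [pvKBefore]
      rw [hk0]
      simp
    · have hm' : (r, 1, (i : Int)) ∈ t := by
        rcases List.mem_cons.mp hm with h1 | h2
        · exact absurd hh (by simp [pvSPred, ← h1])
        · exact h2
      have hc' : t.countP (pvSPred 1 (i : Int)) = 1 := by
        rwa [List.countP_cons_of_neg (by simpa using hh)] at hc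
      have hnn' := fun e he => hnn e (List.mem_cons_of_mem _ he)
      have htag' := fun e he => htag e (List.mem_cons_of_mem _ he)
      rcases htag h (List.mem_cons_self ..) with ht | ht | ht
      · have hstep : pvStep s h = (s.1, s.2.1.set h.2.2.toNat s.2.2, s.2.2) := by
          simp [pvStep, ht]
        rw [hstep]
        rw [ih (s.1, s.2.1.set h.2.2.toNat s.2.2, s.2.2) hp.2 hnn' htag' hm' hc' hlen]
        rw [List.countP_cons_of_neg (by simp [pvKBefore, ht])]
      · have hlt : pvEvKey h < pvEvKey (r, 1, (i : Int)) := by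
          rcases lt_or_eq_of_le (hp.1 _ hm') with h1 | h1
          · exact h1
          · exact absurd (congrArg (fun e => e.2.1) (pvEvKey_inj h1)) (by simp [ht])
        have hstep : pvStep s h = (s.1, s.2.1, s.2.2 + 1) := by
          simp [pvStep, ht]
        rw [hstep]
        rw [ih (s.1, s.2.1, s.2.2 + 1) hp.2 hnn' htag' hm' hc' hlen]
        rw [List.countP_cons_of_pos (by simp [pvKBefore, ht, hlt])]
        congr 1
        push_cast
        ring
      · have hidx : h.2.2 ≠ (i : Int) := by
          intro hcon; exact hh (by simp [pvSPred, ht, hcon])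
        have hstep : pvStep s h = (s.1.set h.2.2.toNat s.2.2, s.2.1, s.2.2) := by
          simp [pvStep, ht]
        rw [hstep]
        rw [ih (s.1.set h.2.2.toNat s.2.2, s.2.1, s.2.2) hp.2 hnn' htag' hm' hc'
            (by simpa using hlen)]
        rw [List.countP_cons_of_neg (by simp [pvKBefore, ht])]

def pvIvE (xs : List (Int × Int)) (s : Int) : List (Int × Int × Int) :=
  (PySem.List.enumerate xs s).flatMap (fun p => [(p.2.1, -1, p.1), (p.2.2, 1, p.1)])

def pvKE (xs : List Int) (s : Int) : List (Int × Int × Int) :=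
  (PySem.List.enumerate xs s).map (fun p => (p.2, 0, p.1))

theorem pv_foldl_two {α β : Type} (xs : List α) (f g : α → β) (acc : List β) :
    xs.foldl (fun a x => (a ++ [f x]) ++ [g x]) acc = acc ++ xs.flatMap (fun x => [f x, g x]) := by
  induction xs generalizing acc with
  | nil => simp
  | cons h t ih => simp [List.flatMap_def]

theorem pv_countkittens_eq (intervals : List (Int × Int)) (kittens : List Int) :
    countkittens intervals kittens =
      (((PySem.List.sorted (pvIvE intervals 0 ++ pvKE kittens 0) pvEvKey false).foldl pvStep
          (List.replicate intervals.length 0, List.replicate intervals.length 0, 0)).1.zip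
        ((PySem.List.sorted (pvIvE intervals 0 ++ pvKE kittens 0) pvEvKey false).foldl pvStep
          (List.replicate intervals.length 0, List.replicate intervals.length 0, 0)).2.1).map
        (fun p => p.1 - p.2) := by
  unfold countkittens
  simp only [pv_foldl_two, PySem.List.foldl_append_singleton_eq_map, List.nil_append]
  simp [pvIvE, pvKE]

theorem pv_ivE_count (xs : List (Int × Int)) (t : Int) (ht : t = -1 ∨ t = 1) : ∀ (s iz : Int),
    (pvIvE xs s).countP (pvSPred t iz) = if s ≤ iz ∧ iz < s + xs.length then 1 else 0 := by
  induction xs with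
  | nil => intro s iz; simp [pvIvE, PySem.List.enumerate_nil]
  | cons x xs ih =>
    intro s iz
    have hstep : pvIvE (x :: xs) s = (x.1, -1, s) :: (x.2, 1, s) :: pvIvE xs (s + 1) := by
      simp [pvIvE, PySem.List.enumerate_cons]
    rw [hstep, List.countP_cons, List.countP_cons, ih (s + 1) iz]
    rcases ht with ht | ht <;> subst ht <;>
      simp [pvSPred] <;> split_ifs <;> simp_all <;> omega

theorem pv_kE_count_tag (xs : List Int) (s : Int) (t iz : Int) (ht : t ≠ 0) :
    (pvKE xs s).countP (pvSPred t iz) = 0 := by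
  rw [List.countP_eq_zero]
  intro e he
  rcases List.mem_map.mp he with ⟨p, _, hpe⟩
  simp [pvSPred, ← hpe]
  intro hcon
  exact absurd hcon.symm ht

theorem pv_ivE_tags (xs : List (Int × Int)) (s : Int) :
    ∀ e ∈ pvIvE xs s, (e.2.1 = -1 ∨ e.2.1 = 1) ∧ s ≤ e.2.2 := by
  intro e he
  rcases List.mem_flatMap.mp he with ⟨p, hp, hm⟩
  rcases PySem.List.mem_enumerate_iff _ _ _ |>.mp hp with ⟨k, hk, hpe⟩
  have hp1 : s ≤ p.1 := by rw [hpe]; omega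
  simp only [List.mem_cons, List.not_mem_nil, or_false] at hm
  rcases hm with h | h <;> subst h <;> simp [hp1]

theorem pv_kE_tags (xs : List Int) (s : Int) :
    ∀ e ∈ pvKE xs s, e.2.1 = 0 ∧ s ≤ e.2.2 := by
  intro e he
  rcases List.mem_map.mp he with ⟨p, hp, hpe⟩
  rcases PySem.List.mem_enumerate_iff _ _ _ |>.mp hp with ⟨k, hk, hpe2⟩
  subst hpe
  have hp1 : s ≤ p.1 := by rw [hpe2]; omega
  simp [hp1]

theorem pv_mem_ivE (intervals : List (Int × Int)) (i : Nat) (hi : i < intervals.length) :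
    (intervals[i].1, -1, (i : Int)) ∈ pvIvE intervals 0 ∧
      (intervals[i].2, 1, (i : Int)) ∈ pvIvE intervals 0 := by
  have hp : ((i : Int), intervals[i]) ∈ PySem.List.enumerate intervals 0 := by
    rw [PySem.List.mem_enumerate_iff]
    exact ⟨i, hi, by simp⟩
  constructor <;> exact List.mem_flatMap.mpr ⟨((i : Int), intervals[i]), hp, by simp⟩

theorem pv_kE_kcount (ks : List Int) (s : Int) (w : Int × Int × Int) (q : Int → Bool)
    (hq : ∀ k j, pvKBefore w (k, 0, j) = q k) :
    (pvKE ks s).countP (pvKBefore w) = ks.countP q := by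
  unfold pvKE
  rw [List.countP_map]
  have hcomp : (pvKBefore w ∘ fun p : Int × Int => (p.2, 0, p.1)) = (fun p => q p.2) := by
    funext p; exact hq p.2 p.1
  rw [hcomp]
  have := List.countP_map (p := q) (f := fun p : Int × Int => p.2)
    (l := PySem.List.enumerate ks s)
  rw [PySem.List.map_snd_enumerate] at this
  rw [this]
  rfl

theorem pv_ivE_kcount_zero (xs : List (Int × Int)) (s : Int) (w : Int × Int × Int) :
    (pvIvE xs s).countP (pvKBefore w) = 0 := by
  rw [List.countP_eq_zero]
  intro e he
  rcases (pv_ivE_tags xs s e he).1 with h | h <;> simp [pvKBefore, h]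

theorem pv_bl_count (ks : List Int) (x : Int) (hs : ks.Pairwise (· ≤ ·)) :
    PySem.List.bisectLeft ks x = ks.countP (fun k => decide (k < x)) := by
  obtain ⟨hle, hlt, hge⟩ := PySem.List.bisectLeft_spec ks x hs
  have h1 : (ks.take (PySem.List.bisectLeft ks x)).countP (fun k => decide (k < x)) =
      (ks.take (PySem.List.bisectLeft ks x)).length := by
    rw [List.countP_eq_length]
    intro a ha
    obtain ⟨j, hj, rfl⟩ := List.mem_iff_getElem.mp ha
    rw [List.getElem_take]
    simp only [List.length_take] at hj
    exact decide_eq_true (hlt j (by omega) (by omega))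
  have h2 : (ks.drop (PySem.List.bisectLeft ks x)).countP (fun k => decide (k < x)) = 0 := by
    rw [List.countP_eq_zero]
    intro a ha
    obtain ⟨j, hj, rfl⟩ := List.mem_iff_getElem.mp ha
    rw [List.getElem_drop]
    simp only [List.length_drop] at hj
    simp only [decide_eq_true_eq, not_lt]
    exact hge _ (by omega) (by omega)
  have h3 := List.countP_append (l₁ := ks.take (PySem.List.bisectLeft ks x))
    (l₂ := ks.drop (PySem.List.bisectLeft ks x)) (p := fun k => decide (k < x))
  rw [List.take_append_drop] at h3
  rw [h3, h1, h2, List.length_take]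
  omega

theorem pv_br_count (ks : List Int) (x : Int) (hs : ks.Pairwise (· ≤ ·)) :
    PySem.List.bisectRight ks x = ks.countP (fun k => decide (k ≤ x)) := by
  obtain ⟨hle, hlt, hge⟩ := PySem.List.bisectRight_spec ks x hs
  have h1 : (ks.take (PySem.List.bisectRight ks x)).countP (fun k => decide (k ≤ x)) =
      (ks.take (PySem.List.bisectRight ks x)).length := by
    rw [List.countP_eq_length]
    intro a ha
    obtain ⟨j, hj, rfl⟩ := List.mem_iff_getElem.mp ha
    rw [List.getElem_take]
    simp only [List.length_take] at hj
    exact decide_eq_true (hlt j (by omega) (by omega))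
  have h2 : (ks.drop (PySem.List.bisectRight ks x)).countP (fun k => decide (k ≤ x)) = 0 := by
    rw [List.countP_eq_zero]
    intro a ha
    obtain ⟨j, hj, rfl⟩ := List.mem_iff_getElem.mp ha
    rw [List.getElem_drop]
    simp only [List.length_drop] at hj
    simp only [decide_eq_true_eq, not_le]
    exact hge _ (by omega) (by omega)
  have h3 := List.countP_append (l₁ := ks.take (PySem.List.bisectRight ks x))
    (l₂ := ks.drop (PySem.List.bisectRight ks x)) (p := fun k => decide (k ≤ x))
  rw [List.take_append_drop] at h3
  rw [h3, h1, h2, List.length_take]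
  omega

theorem pv_alt_eq (intervals : List (Int × Int)) (kittens : List Int) :
    countkittens_alt intervals kittens = intervals.map (fun p =>
      (kittens.countP (fun k => decide (k ≤ p.2)) : Int) -
        (kittens.countP (fun k => decide (k < p.1)) : Int)) := by
  unfold countkittens_alt
  have hp : (PySem.List.sorted kittens (fun x => x) false).Pairwise (· ≤ ·) := by
    simpa using PySem.List.sorted_pairwise kittens (fun x => x)
  have hperm := PySem.List.sorted_perm kittens (fun x => x) false
  apply List.map_congr_left
  intro p _
  rw [pv_br_count _ _ hp, pv_bl_count _ _ hp,
    hperm.countP_eq, hperm.countP_eq]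

theorem pv_A_getElem (intervals : List (Int × Int)) (kittens : List Int)
    (i : Nat) (hi : i < intervals.length) :
    (countkittens intervals kittens)[i]? =
      some ((kittens.countP (fun k => decide (k ≤ intervals[i].2)) : Int) -
        (kittens.countP (fun k => decide (k < intervals[i].1)) : Int)) := by
  rw [pv_countkittens_eq]
  have hperm : (PySem.List.sorted (pvIvE intervals 0 ++ pvKE kittens 0) pvEvKey false).Perm
      (pvIvE intervals 0 ++ pvKE kittens 0) :=
    PySem.List.sorted_perm _ _ _
  have hpw : (PySem.List.sorted (pvIvE intervals 0 ++ pvKE kittens 0) pvEvKey false).Pairwise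
      (fun a b => pvEvKey a ≤ pvEvKey b) :=
    PySem.List.sorted_pairwise _ _
  have hEfacts : ∀ e ∈ pvIvE intervals 0 ++ pvKE kittens 0,
      (e.2.1 = -1 ∨ e.2.1 = 0 ∨ e.2.1 = 1) ∧ 0 ≤ e.2.2 := by
    intro e he
    rcases List.mem_append.mp he with h | h
    · rcases pv_ivE_tags _ _ e h with ⟨h1, h2⟩
      exact ⟨by tauto, h2⟩
    · rcases pv_kE_tags _ _ e h with ⟨h1, h2⟩
      exact ⟨by tauto, h2⟩
  have hnn : ∀ e ∈ PySem.List.sorted (pvIvE intervals 0 ++ pvKE kittens 0) pvEvKey false,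
      0 ≤ e.2.2 := fun e he => (hEfacts e (hperm.mem_iff.mp he)).2
  have htag : ∀ e ∈ PySem.List.sorted (pvIvE intervals 0 ++ pvKE kittens 0) pvEvKey false,
      e.2.1 = -1 ∨ e.2.1 = 0 ∨ e.2.1 = 1 := fun e he => (hEfacts e (hperm.mem_iff.mp he)).1
  -- the unique START-i and END-i events
  have hcS : (PySem.List.sorted (pvIvE intervals 0 ++ pvKE kittens 0) pvEvKey
      false).countP (pvSPred (-1) (i : Int)) = 1 := by
    rw [hperm.countP_eq, List.countP_append, pv_ivE_count _ _ (Or.inl rfl),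
      pv_kE_count_tag _ _ _ _ (by norm_num)]
    simp
    omega
  have hcE : (PySem.List.sorted (pvIvE intervals 0 ++ pvKE kittens 0) pvEvKey
      false).countP (pvSPred 1 (i : Int)) = 1 := by
    rw [hperm.countP_eq, List.countP_append, pv_ivE_count _ _ (Or.inr rfl),
      pv_kE_count_tag _ _ _ _ (by norm_num)]
    simp
    omega
  have hmS : (intervals[i].1, -1, (i : Int)) ∈
      PySem.List.sorted (pvIvE intervals 0 ++ pvKE kittens 0) pvEvKey false :=
    hperm.mem_iff.mpr (List.mem_append_left _ (pv_mem_ivE intervals i hi).1)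
  have hmE : (intervals[i].2, 1, (i : Int)) ∈
      PySem.List.sorted (pvIvE intervals 0 ++ pvKE kittens 0) pvEvKey false :=
    hperm.mem_iff.mpr (List.mem_append_left _ (pv_mem_ivE intervals i hi).2)
  -- kitten counts seen before the two events
  have hkS : (PySem.List.sorted (pvIvE intervals 0 ++ pvKE kittens 0) pvEvKey
      false).countP (pvKBefore (intervals[i].1, -1, (i : Int))) =
      kittens.countP (fun k => decide (k < intervals[i].1)) := by
    rw [hperm.countP_eq, List.countP_append, pv_ivE_kcount_zero,
      pv_kE_kcount kittens 0 _ (fun k => decide (k < intervals[i].1))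
        (fun k j => by simp [pvKBefore, pv_kitten_lt_start])]
    simp
  have hkE : (PySem.List.sorted (pvIvE intervals 0 ++ pvKE kittens 0) pvEvKey
      false).countP (pvKBefore (intervals[i].2, 1, (i : Int))) =
      kittens.countP (fun k => decide (k ≤ intervals[i].2)) := by
    rw [hperm.countP_eq, List.countP_append, pv_ivE_kcount_zero,
      pv_kE_kcount kittens 0 _ (fun k => decide (k ≤ intervals[i].2))
        (fun k j => by simp [pvKBefore, pv_kitten_lt_end])]
    simp
  have hstart := pv_main_start
    (PySem.List.sorted (pvIvE intervals 0 ++ pvKE kittens 0) pvEvKey false)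
    (List.replicate intervals.length 0, List.replicate intervals.length 0, 0)
    intervals[i].1 i hpw hnn htag hmS hcS (by simpa using hi)
  have hend := pv_main_end
    (PySem.List.sorted (pvIvE intervals 0 ++ pvKE kittens 0) pvEvKey false)
    (List.replicate intervals.length 0, List.replicate intervals.length 0, 0)
    intervals[i].2 i hpw hnn htag hmE hcE (by simpa using hi)
  rw [hkS] at hstart
  rw [hkE] at hend
  rcases pv_fold_len
    (PySem.List.sorted (pvIvE intervals 0 ++ pvKE kittens 0) pvEvKey false)
    (List.replicate intervals.length 0, List.replicate intervals.length 0, 0) with ⟨hl1, hl2⟩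
  simp only [List.length_replicate] at hl1 hl2
  have hmaplen : i < ((((PySem.List.sorted (pvIvE intervals 0 ++ pvKE kittens 0) pvEvKey
      false).foldl pvStep (List.replicate intervals.length 0, List.replicate intervals.length 0,
      0)).1.zip (((PySem.List.sorted (pvIvE intervals 0 ++ pvKE kittens 0) pvEvKey
      false).foldl pvStep (List.replicate intervals.length 0, List.replicate intervals.length 0,
      0)).2.1)).map (fun p : Int × Int => p.1 - p.2)).length := by
    rw [List.length_map, List.length_zip, hl1, hl2]
    omega
  rw [List.getElem?_eq_getElem hmaplen, List.getElem_map, List.getElem_zip]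
  have hv1 := (List.getElem?_eq_getElem (l := (((PySem.List.sorted (pvIvE intervals 0 ++
      pvKE kittens 0) pvEvKey false).foldl pvStep (List.replicate intervals.length 0,
      List.replicate intervals.length 0, 0)).1)) (i := i) (by omega)).symm.trans hend
  have hv2 := (List.getElem?_eq_getElem (l := (((PySem.List.sorted (pvIvE intervals 0 ++
      pvKE kittens 0) pvEvKey false).foldl pvStep (List.replicate intervals.length 0,
      List.replicate intervals.length 0, 0)).2.1)) (i := i) (by omega)).symm.trans hstart
  rw [Option.some_inj.mp hv1, Option.some_inj.mp hv2]
  simp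

theorem pv_A_length (intervals : List (Int × Int)) (kittens : List Int) :
    (countkittens intervals kittens).length = intervals.length := by
  rw [pv_countkittens_eq]
  rcases pv_fold_len
    (PySem.List.sorted (pvIvE intervals 0 ++ pvKE kittens 0) pvEvKey false)
    (List.replicate intervals.length 0, List.replicate intervals.length 0, 0) with ⟨hl1, hl2⟩
  simp only [List.length_replicate] at hl1 hl2
  rw [List.length_map, List.length_zip, hl1, hl2]
  omega

theorem countkittens_spec : Claim_equal_countkittens := by
  unfold Claim_equal_countkittens
  intro intervals kittens _
  unfold Spec_countkittens
  rw [pv_alt_eq]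
  apply List.ext_getElem
  · rw [pv_A_length, List.length_map]
  · intro j h1 h2
    have hj : j < intervals.length := by
      have := pv_A_length intervals kittens; omega
    have hval := pv_A_getElem intervals kittens j hj
    rw [List.getElem?_eq_getElem h1] at hval
    rw [Option.some_inj.mp hval, List.getElem_map]
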